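-- pv_equiv track=rewrite | github.com/olga-bulavina/LearnPython | linear/linear.py | found_winner
-- ===== SOURCE A (Python) =====
-- xxx = ['x', 'x', 'x']
--
-- ooo = ['o', 'o', 'o']
--
-- def found_winner(board):
--     for i in range(len(board) - 2):
--         if board[i:i+3] == xxx:
--             return 'x'
--         if board[i:i+3] == ooo:
--             return 'o'
--     if '-' not in board:
--         return '*'
--     return None
-- ===== SOURCE B (Python) =====
-- def found_winner(board):
--     prev = None
--     count = 0
--     for cell in board:
--         if cell == prev:
--             count += 1
--         else:
--             prev = cell
--             count = 1
--         if count == 3 and (cell == 'x' or cell == 'o'):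
--             return cell
--     if '-' not in board:
--         return '*'
--     return None
-- ===== Notes on version B (the rewrite author's own statement) =====
-- stated objective: alternative
-- what changed: Replaced the overlapping 3-slice window comparisons against the xxx/ooo constant lists by a single pass that maintains the previous cell and a consecutive-run counter, returning as soon as a run of 3 of 'x' or 'o' is seen.
import Mathlib
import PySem

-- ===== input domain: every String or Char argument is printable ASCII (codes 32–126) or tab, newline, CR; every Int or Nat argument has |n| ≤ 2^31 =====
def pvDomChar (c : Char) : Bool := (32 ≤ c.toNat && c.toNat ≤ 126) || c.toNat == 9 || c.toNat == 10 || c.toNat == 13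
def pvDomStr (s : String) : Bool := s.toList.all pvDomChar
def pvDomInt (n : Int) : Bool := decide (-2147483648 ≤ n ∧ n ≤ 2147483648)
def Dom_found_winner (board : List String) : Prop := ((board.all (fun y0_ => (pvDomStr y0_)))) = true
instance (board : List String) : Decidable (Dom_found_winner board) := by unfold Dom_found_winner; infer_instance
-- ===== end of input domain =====

-- B replaces A's overlapping 3-slice window comparisons by a single pass with a previous-cell/run-length counter (alternative decomposition, same O(n) cost).


-- ===== PORT A =====
-- the loop 'for i in range(len(board)-2): …' with early return, over the remaining range indices
def fwA_go (board : List String) : List Int → Option String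
  | [] => none
  | i :: rest =>
    if PySem.List.slice board (some i) (some (i + 3)) = ["x", "x", "x"] then some "x"
    else if PySem.List.slice board (some i) (some (i + 3)) = ["o", "o", "o"] then some "o"
    else fwA_go board rest

def found_winner (board : List String) : Option String :=
  match fwA_go board (PySem.List.pyRange 0 ((board.length : Int) - 2) 1) with
  | some w => some w
  | none => if board.contains "-" then none else some "*"

-- ===== PORT B =====
-- the loop 'for cell in board: …' carrying (prev, count), with early return on a run of 3
def fwB_go : List String → Option String → Int → Option String
  | [], _, _ => none
  | cell :: rest, prev, count =>
    let prev' := if some cell = prev then prev else some cell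
    let count' := if some cell = prev then count + 1 else 1
    if count' = 3 ∧ (cell = "x" ∨ cell = "o") then some cell
    else fwB_go rest prev' count'

def found_winner_alt (board : List String) : Option String :=
  match fwB_go board none 0 with
  | some w => some w
  | none => if board.contains "-" then none else some "*"

-- ===== PRECONDITION & SPEC =====
def Spec_found_winner (board : List String) (out : Option String) : Prop := out = found_winner_alt board
instance (board : List String) (out : Option String) : Decidable (Spec_found_winner board out) := by unfold Spec_found_winner; infer_instance

-- ===== CLAIM (what is proved, stated in full; the proofs are below) =====
def Claim_equal_found_winner : Prop := ∀ (board : List String), Dom_found_winner board → Spec_found_winner board (found_winner board)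

-- ===== LEMMAS AND PROOFS =====

-- common reference form: structural recursion over the suffixes of the board
def winA : List String → Option String
  | a :: b :: c :: rest =>
    if a = "x" ∧ b = "x" ∧ c = "x" then some "x"
    else if a = "o" ∧ b = "o" ∧ c = "o" then some "o"
    else winA (b :: c :: rest)
  | _ => none

theorem winA_short : ∀ (xs : List String), xs.length < 3 → winA xs = none
  | [], _ => rfl
  | [_], _ => rfl
  | [_, _], _ => rfl
  | _ :: _ :: _ :: _, h => by simp only [List.length_cons] at h; omega

theorem winA_step_ne (a b c : String) (ys : List String)
    (hx : ¬(a = "x" ∧ b = "x" ∧ c = "x")) (ho : ¬(a = "o" ∧ b = "o" ∧ c = "o")) :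
    winA (a :: b :: c :: ys) = winA (b :: c :: ys) := by
  rw [winA, if_neg hx, if_neg ho]

theorem winA_cons_ne (p q : String) (ys : List String) (h : p ≠ q) :
    winA (p :: q :: ys) = winA (q :: ys) := by
  cases ys with
  | nil => rfl
  | cons d more =>
    exact winA_step_ne p q d more
      (fun hc => h (hc.1.trans hc.2.1.symm)) (fun hc => h (hc.1.trans hc.2.1.symm))

theorem winA_cons_cons_ne (p q : String) (ys : List String) (h : ¬ q = p) :
    winA (p :: p :: q :: ys) = winA (q :: ys) := by
  rw [winA_step_ne p p q ys
      (fun hc => h (hc.2.2.trans hc.1.symm)) (fun hc => h (hc.2.2.trans hc.1.symm))]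
  exact winA_cons_ne p q ys (fun hc => h hc.symm)

-- A's range loop computes winA of the suffix
theorem fwA_go_eq_winA (fuel : Nat) : ∀ (board : List String) (j : Nat),
    board.length = j + fuel →
    fwA_go board (PySem.List.pyRange (j : Int) ((board.length : Int) - 2) 1) = winA (board.drop j) := by
  induction fuel with
  | zero =>
    intro board j h
    rw [PySem.List.pyRange_one_eq_nil (by omega)]
    rw [fwA_go, winA_short _ (by simp only [List.length_drop]; omega)]
  | succ f ih =>
    intro board j h
    by_cases hf : f + 1 < 3
    · rw [PySem.List.pyRange_one_eq_nil (by omega)]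
      rw [fwA_go, winA_short _ (by simp only [List.length_drop]; omega)]
    · have hlt : (j : Int) < (board.length : Int) - 2 := by omega
      rw [PySem.List.pyRange_one_cons hlt, fwA_go]
      have hslice : PySem.List.slice board (some (j : Int)) (some ((j : Int) + 3)) =
          (board.drop j).take 3 := by
        have := PySem.List.slice_natCast_add board j 3
        simpa using this
      have hdroplen : (board.drop j).length = f + 1 := by
        simp only [List.length_drop]; omega
      obtain ⟨a, b, c, rest, hd⟩ : ∃ a b c rest, board.drop j = a :: b :: c :: rest := by
        match hx : board.drop j, hdroplen with
        | a :: b :: c :: rest, _ => exact ⟨a, b, c, rest, rfl⟩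
        | [], hh | [a], hh | [a, b], hh => simp only [List.length_nil, List.length_cons] at hh; omega
      have hdrop1 : board.drop (j + 1) = b :: c :: rest := by
        have h1 : board.drop (j + 1) = List.drop 1 (List.drop j board) := by
          rw [List.drop_drop]
        rw [h1, hd]
        rfl
      have htail := ih board (j + 1) (by omega)
      rw [hdrop1] at htail
      have hcast : ((j : Int) + 1) = ((j + 1 : Nat) : Int) := by push_cast; ring
      rw [hslice, hd, hcast, htail]
      show (if ([a, b, c] : List String) = ["x", "x", "x"] then some "x"
            else if ([a, b, c] : List String) = ["o", "o", "o"] then some "o"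
            else winA (b :: c :: rest)) = winA (a :: b :: c :: rest)
      by_cases hx : ([a, b, c] : List String) = ["x", "x", "x"]
      · have hc : a = "x" ∧ b = "x" ∧ c = "x" := by simpa using hx
        obtain ⟨h1, h2, h3⟩ := hc; subst h1; subst h2; subst h3
        rw [if_pos rfl, winA, if_pos ⟨rfl, rfl, rfl⟩]
      · rw [if_neg hx]
        have hx' : ¬(a = "x" ∧ b = "x" ∧ c = "x") := by
          intro hc; exact hx (by rw [hc.1, hc.2.1, hc.2.2])
        by_cases ho : ([a, b, c] : List String) = ["o", "o", "o"]
        · have hc : a = "o" ∧ b = "o" ∧ c = "o" := by simpa using ho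
          obtain ⟨h1, h2, h3⟩ := hc; subst h1; subst h2; subst h3
          rw [if_pos rfl, winA, if_neg (by simp), if_pos ⟨rfl, rfl, rfl⟩]
        · have ho' : ¬(a = "o" ∧ b = "o" ∧ c = "o") := by
            intro hc; exact ho (by rw [hc.1, hc.2.1, hc.2.2])
          rw [if_neg ho, winA_step_ne a b c rest hx' ho']

-- once the count is ≥ 3 on a non-winner mark, it behaves like count = 2
theorem fwB_go_big (xs : List String) : ∀ (p : String) (k : Int), 3 ≤ k →
    p ≠ "x" → p ≠ "o" → fwB_go xs (some p) k = fwB_go xs (some p) 2 := by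
  induction xs with
  | nil => intro p k _ _ _; rfl
  | cons c rest ih =>
    intro p k hk hpx hpo
    by_cases hc : (some c : Option String) = some p
    · have hc' : c = p := Option.some.inj hc
      subst hc'
      rw [fwB_go, fwB_go]
      simp only [if_true]
      rw [if_neg (fun h => h.2.elim hpx hpo), if_neg (fun h => h.2.elim hpx hpo)]
      rw [ih c (k + 1) (by omega) hpx hpo, ih c (2 + 1) (by omega) hpx hpo]
    · rw [fwB_go, fwB_go]
      simp only [if_neg hc]

-- main invariant: after consuming one (resp. two equal) cells, B's run loop is winA on the padded suffix
theorem fwB_go_eq_winA (xs : List String) : ∀ (p : String),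
    (fwB_go xs (some p) 1 = winA (p :: xs)) ∧ (fwB_go xs (some p) 2 = winA (p :: p :: xs)) := by
  induction xs with
  | nil =>
    intro p
    refine ⟨rfl, ?_⟩
    show (none : Option String) = winA [p, p]
    rfl
  | cons c rest ih =>
    intro p
    by_cases hc : (some c : Option String) = some p
    · have hc' : c = p := Option.some.inj hc
      subst hc'
      constructor
      · rw [fwB_go]
        simp only [if_true]
        rw [if_neg (fun h => absurd h.1 (by norm_num))]
        exact (ih c).2
      · rw [fwB_go]
        simp only [if_true]
        by_cases hw : c = "x" ∨ c = "o"
        · rw [if_pos ⟨by norm_num, hw⟩]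
          rcases hw with h | h <;> subst h
          · rw [winA, if_pos ⟨rfl, rfl, rfl⟩]
          · rw [winA, if_neg (by simp), if_pos ⟨rfl, rfl, rfl⟩]
        · rw [if_neg (fun h => hw h.2)]
          have hw' : c ≠ "x" ∧ c ≠ "o" := ⟨fun h => hw (Or.inl h), fun h => hw (Or.inr h)⟩
          rw [fwB_go_big rest c (2 + 1) (by omega) hw'.1 hw'.2, (ih c).2]
          rw [winA_step_ne c c c rest (fun h => hw'.1 h.1) (fun h => hw'.2 h.1)]
    · have hc' : ¬ c = p := fun h => hc (by rw [h])
      constructor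
      · rw [fwB_go]
        simp only [if_neg hc]
        rw [if_neg (fun h => absurd h.1 (by norm_num))]
        rw [(ih c).1, winA_cons_ne p c rest (fun h => hc' h.symm)]
      · rw [fwB_go]
        simp only [if_neg hc]
        rw [if_neg (fun h => absurd h.1 (by norm_num))]
        rw [(ih c).1, winA_cons_cons_ne p c rest hc']

theorem loops_agree (board : List String) :
    fwA_go board (PySem.List.pyRange 0 ((board.length : Int) - 2) 1) = fwB_go board none 0 := by
  have ha := fwA_go_eq_winA board.length board 0 (by omega)
  simp only [Nat.cast_zero, List.drop_zero] at ha
  rw [ha]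
  cases board with
  | nil => rfl
  | cons c rest =>
    rw [fwB_go]
    simp only [if_neg (by simp : ¬ (some c = (none : Option String)))]
    rw [if_neg (fun h => absurd h.1 (by norm_num))]
    exact ((fwB_go_eq_winA rest c).1).symm

-- ===== VERDICT (by name: the statement is the Claim_ definition above) =====
theorem found_winner_spec : Claim_equal_found_winner := by
  intro board _
  unfold Spec_found_winner found_winner found_winner_alt
  rw [loops_agree]
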